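-- pv_equiv track=rewrite | github.com/joshroybal/Python-Constraint-Satisfaction-Programming | word_search.py | satisfied
-- ===== SOURCE A (Python) =====
-- from typing import NamedTuple, List, Dict, Optional, Tuple
--
-- class GridLocation(NamedTuple):
--     row: int
--     column: int
--
-- def satisfied(assignment: Dict[str, List[GridLocation]]) -> bool:
--     # in this version words in the grid are allowed to overlap
--     # x = []
--     # for word in assignment:
--     #     x.append([(i,j) for (i,j) in assignment[word]])
--
--     # for i in range(len(x)):
--     #     for j in range(i + 1, len(x)):
--     #         words_intersection = set(x[i]) & set(x[j])
--     #         if len(words_intersection) > 1: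
--     #             return False
--
--     d: Dict[Tuple[int, int], str]  = {}
--     for word in assignment:
--         indices = [(i,j) for (i,j) in assignment[word]]
--         for v,k in zip(word,indices):
--             if k in d and d[k] != v:
--                 return False
--             d[k] = v
--         #actual = ''.join([d[(i,j)] for (i,j) in assignment[word]])
--
--     return True
-- ===== SOURCE B (Python) =====
-- def satisfied(assignment):
--     # flatten all placed letters to (cell, letter) pairs, then exhaustively compare
--     # every two placements: any two letters on the same cell must be equal
--     pairs = [(loc, letter) for word in assignment for letter, loc in zip(word, assignment[word])]
--     return all(p[1] == q[1] for p in pairs for q in pairs if p[0] == q[0])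
-- ===== Notes on version B (the rewrite author's own statement) =====
-- stated objective: alternative
-- what changed: Replaces A's incremental cell->letter dict with early return by a flatten-then-exhaustive pairwise comparison: every two placed letters landing on the same cell are compared directly, no dictionary and no incremental state.
import Mathlib
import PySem

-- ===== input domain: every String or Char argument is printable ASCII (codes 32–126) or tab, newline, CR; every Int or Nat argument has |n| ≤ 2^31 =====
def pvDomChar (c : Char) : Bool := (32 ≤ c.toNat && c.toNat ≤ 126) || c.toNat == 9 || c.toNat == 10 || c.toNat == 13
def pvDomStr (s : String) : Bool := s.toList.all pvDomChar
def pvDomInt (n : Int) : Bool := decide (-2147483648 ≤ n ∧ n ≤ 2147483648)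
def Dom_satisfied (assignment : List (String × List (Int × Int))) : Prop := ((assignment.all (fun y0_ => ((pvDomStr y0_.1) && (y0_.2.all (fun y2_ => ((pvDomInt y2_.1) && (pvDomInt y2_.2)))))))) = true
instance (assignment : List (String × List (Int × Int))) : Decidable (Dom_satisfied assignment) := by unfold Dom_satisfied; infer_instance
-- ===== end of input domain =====

-- B flattens all placements to (cell, letter) pairs and exhaustively compares every two
-- placements on the same cell, instead of A's incremental cell->letter dict with early
-- return (objective: alternative; not faster — O(n^2) vs A's single pass).

-- ===== PORT A =====
-- inner loop 'for v,k in zip(word, indices)': none models the early 'return False'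
def satisfiedInner (d : PySem.Dict (Int × Int) Char) :
    List (Char × (Int × Int)) → Option (PySem.Dict (Int × Int) Char)
  | [] => some d
  | (v, k) :: rest =>
    if d.contains k && decide (d.get? k ≠ some v) then none
    else satisfiedInner (d.insert k v) rest

-- outer loop 'for word in assignment' over the dict's entries
def satisfiedOuter (d : PySem.Dict (Int × Int) Char) :
    List (String × List (Int × Int)) → Bool
  | [] => true
  | (w, locs) :: rest =>
    match satisfiedInner d (w.toList.zip locs) with
    | none => false
    | some d' => satisfiedOuter d' rest

def satisfied (assignment : List (String × List (Int × Int))) : Bool :=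
  satisfiedOuter PySem.Dict.empty (PySem.Dict.ofList assignment).items

-- ===== PORT B =====
def satisfied_alt (assignment : List (String × List (Int × Int))) : Bool :=
  let pairs : List ((Int × Int) × Char) :=
    (PySem.Dict.ofList assignment).items.flatMap
      (fun wl => (wl.1.toList.zip wl.2).map (fun p => (p.2, p.1)))
  pairs.all (fun p => pairs.all (fun q => !(p.1 == q.1) || (p.2 == q.2)))

-- ===== PRECONDITION & SPEC =====
def Spec_satisfied (assignment : List (String × List (Int × Int))) (out : Bool) : Prop := out = satisfied_alt assignment
instance (assignment : List (String × List (Int × Int))) (out : Bool) : Decidable (Spec_satisfied assignment out) := by unfold Spec_satisfied; infer_instance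

-- ===== CLAIM (what is proved, stated in full; the proofs are below) =====
def Claim_equal_satisfied : Prop := ∀ (assignment : List (String × List (Int × Int))), Dom_satisfied assignment → Spec_satisfied assignment (satisfied assignment)

-- ===== LEMMAS AND PROOFS =====

-- the flat list of (cell, letter) pairs both programs range over
def pvPairs (l : List (String × List (Int × Int))) : List ((Int × Int) × Char) :=
  l.flatMap (fun wl => (wl.1.toList.zip wl.2).map (fun p => (p.2, p.1)))

def pvOk (d : PySem.Dict (Int × Int) Char) (m : List ((Int × Int) × Char)) : Prop :=
  (∀ p ∈ m, ∀ q ∈ m, p.1 = q.1 → p.2 = q.2) ∧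
  (∀ p ∈ m, ∀ v, d.get? p.1 = some v → v = p.2)

lemma satisfiedInner_append (d : PySem.Dict (Int × Int) Char)
    (m₁ m₂ : List (Char × (Int × Int))) :
    satisfiedInner d (m₁ ++ m₂) = (satisfiedInner d m₁).bind (fun d' => satisfiedInner d' m₂) := by
  induction m₁ generalizing d with
  | nil => simp [satisfiedInner]
  | cons p rest ih =>
    obtain ⟨v, k⟩ := p
    simp only [List.cons_append, satisfiedInner]
    split
    · rfl
    · exact ih _

lemma satisfiedOuter_eq_inner (d : PySem.Dict (Int × Int) Char)
    (l : List (String × List (Int × Int))) :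
    satisfiedOuter d l =
      (satisfiedInner d ((pvPairs l).map (fun p => (p.2, p.1)))).isSome := by
  induction l generalizing d with
  | nil => simp [satisfiedOuter, pvPairs, satisfiedInner]
  | cons wl rest ih =>
    obtain ⟨w, locs⟩ := wl
    have hz : ((w.toList.zip locs).map (fun p : Char × (Int × Int) => (p.2, p.1))).map
        (fun p : (Int × Int) × Char => (p.2, p.1)) = w.toList.zip locs := by
      simp [List.map_map, Function.comp_def]
    simp only [satisfiedOuter, pvPairs, List.flatMap_cons, List.map_append, hz,
      satisfiedInner_append]
    cases h : satisfiedInner d (w.toList.zip locs) with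
    | none => simp
    | some d' => simpa [pvPairs] using ih d'

lemma satisfiedInner_isSome_iff (m : List ((Int × Int) × Char))
    (d : PySem.Dict (Int × Int) Char) :
    (satisfiedInner d (m.map (fun p => (p.2, p.1)))).isSome = true ↔ pvOk d m := by
  induction m generalizing d with
  | nil =>
    simp [satisfiedInner, pvOk]
  | cons p rest ih =>
    obtain ⟨k, v⟩ := p
    simp only [List.map_cons, satisfiedInner]
    by_cases hg : d.contains k && decide (d.get? k ≠ some v)
    · simp only [hg, if_true]
      constructor
      · intro h; cases h
      · rintro ⟨h1, h2⟩
        exfalso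
        simp only [Bool.and_eq_true, decide_eq_true_eq] at hg
        obtain ⟨hc, hne⟩ := hg
        rw [PySem.Dict.contains_eq_isSome_get?] at hc
        obtain ⟨u, hu⟩ := Option.isSome_iff_exists.mp hc
        exact hne (by rw [hu, h2 (k, v) (List.mem_cons_self ..) u hu])
    · simp only [hg, Bool.false_eq_true, if_false]
      rw [ih]
      have hguard : d.get? k = none ∨ d.get? k = some v := by
        simp only [Bool.and_eq_true, decide_eq_true_eq, not_and, not_not] at hg
        rw [PySem.Dict.contains_eq_isSome_get?] at hg
        cases h : d.get? k with
        | none => exact Or.inl rfl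
        | some u => exact Or.inr (h ▸ hg (by rw [h]; rfl))
      constructor
      · rintro ⟨h1, h2⟩
        refine ⟨?_, ?_⟩
        · rintro p hp q hq hpq
          rcases List.mem_cons.mp hp with rfl | hp <;> rcases List.mem_cons.mp hq with rfl | hq
          · rfl
          · exact (h2 q hq v (by rw [← hpq]; exact PySem.Dict.get?_insert_self d k v))
          · exact (h2 p hp v (by rw [hpq]; exact PySem.Dict.get?_insert_self d k v)).symm
          · exact h1 p hp q hq hpq
        · rintro p hp u hu
          rcases List.mem_cons.mp hp with rfl | hp
          · rcases hguard with h | h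
            · rw [h] at hu; cases hu
            · rw [h] at hu; injection hu with h'; exact h'.symm
          · by_cases hk : p.1 = k
            · have : v = p.2 := h2 p hp v (by rw [hk]; exact PySem.Dict.get?_insert_self d k v)
              rcases hguard with h | h
              · rw [hk, h] at hu; cases hu
              · rw [hk, h] at hu; injection hu with h'; exact h' ▸ this
            · exact h2 p hp u (by rw [PySem.Dict.get?_insert_of_ne d v hk]; exact hu)
      · rintro ⟨h1, h2⟩
        refine ⟨?_, ?_⟩
        · intro p hp q hq hpq
          exact h1 p (List.mem_cons_of_mem _ hp) q (List.mem_cons_of_mem _ hq) hpq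
        · rintro p hp u hu
          by_cases hk : p.1 = k
          · rw [hk, PySem.Dict.get?_insert_self] at hu
            injection hu with h'
            exact h' ▸ (h1 (k, v) (List.mem_cons_self ..) p (List.mem_cons_of_mem _ hp) hk.symm)
          · rw [PySem.Dict.get?_insert_of_ne d v hk] at hu
            exact h2 p (List.mem_cons_of_mem _ hp) u hu

-- A = true iff the flat pair list is functional
lemma satisfied_eq_iff (l : List (String × List (Int × Int))) :
    satisfiedOuter PySem.Dict.empty l = true ↔
      ∀ p ∈ pvPairs l, ∀ q ∈ pvPairs l, p.1 = q.1 → p.2 = q.2 := by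
  rw [satisfiedOuter_eq_inner, satisfiedInner_isSome_iff]
  unfold pvOk
  constructor
  · exact fun h => h.1
  · intro h
    exact ⟨h, by intro p _ v hv; rw [PySem.Dict.get?_empty] at hv; cases hv⟩

-- B = true iff the flat pair list is functional
lemma satisfied_alt_eq_iff (l : List (String × List (Int × Int))) :
    ((pvPairs l).all (fun p => (pvPairs l).all
        (fun q => !(p.1 == q.1) || (p.2 == q.2)))) = true ↔
      ∀ p ∈ pvPairs l, ∀ q ∈ pvPairs l, p.1 = q.1 → p.2 = q.2 := by
  simp [List.all_eq_true, Bool.or_eq_true, imp_iff_not_or]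

-- ===== VERDICT (by name: the statement is the Claim_ definition above) =====
theorem satisfied_spec : Claim_equal_satisfied := by
  intro assignment _
  unfold Spec_satisfied satisfied satisfied_alt
  rw [Bool.eq_iff_iff]
  rw [satisfied_eq_iff]
  exact (satisfied_alt_eq_iff (PySem.Dict.ofList assignment).items).symm
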